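-- pv_equiv track=rewrite | github.com/saptera/MEGIT | megit/data.py | get_frm_gap
-- ===== SOURCE A (Python) =====
-- def get_frm_gap(frm_lst):
--     """ Detect separation points of frame number.
--         - [frm_lst] must be pre-sorted, call sort() when necessary
--
--     Args:
--         frm_lst (list[int]): Input list of frame indices
--
--     Returns:
--         list[list[int]]: Frame indices seperated by gaps
--     """
--     sep_init = 0  # INIT VAR
--     sep_idx = []  # INIT VAR
--     for i in range(len(frm_lst) - 1):
--         if (frm_lst[i + 1] - frm_lst[i]) != 1:
--             sep_idx.append([sep_init, i + 1])  # [i + 1] to produce correct slicing results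
--             sep_init = i + 1
--     sep_idx.append([sep_init, len(frm_lst)])
--     return sep_idx
-- ===== SOURCE B (Python) =====
-- def get_frm_gap(frm_lst):
--     """ Detect separation points of frame number.
--
--     Run extraction by arithmetic invariant: inside a contiguous run the
--     quantity frm_lst[i] - i is constant, so each maximal run is scanned
--     forward while that key stays equal to the run-start key, and the runs
--     are emitted one by one.
--     """
--     n = len(frm_lst)
--     segs = []
--     start = 0
--     while start < n:
--         key = frm_lst[start] - start
--         end = start + 1
--         while end < n and frm_lst[end] - end == key:
--             end += 1
--         segs.append([start, end])
--         start = end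
--     return segs or [[0, 0]]
-- ===== Notes on version B (the rewrite author's own statement) =====
-- stated objective: alternative
-- what changed: Replaces the single-pass adjacent-difference gap detector with run extraction by the arithmetic invariant frm_lst[i]-i: an outer loop jumps from run start to run start and an inner scan extends each run while the value-minus-index key equals the run-start key.
import Mathlib
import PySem

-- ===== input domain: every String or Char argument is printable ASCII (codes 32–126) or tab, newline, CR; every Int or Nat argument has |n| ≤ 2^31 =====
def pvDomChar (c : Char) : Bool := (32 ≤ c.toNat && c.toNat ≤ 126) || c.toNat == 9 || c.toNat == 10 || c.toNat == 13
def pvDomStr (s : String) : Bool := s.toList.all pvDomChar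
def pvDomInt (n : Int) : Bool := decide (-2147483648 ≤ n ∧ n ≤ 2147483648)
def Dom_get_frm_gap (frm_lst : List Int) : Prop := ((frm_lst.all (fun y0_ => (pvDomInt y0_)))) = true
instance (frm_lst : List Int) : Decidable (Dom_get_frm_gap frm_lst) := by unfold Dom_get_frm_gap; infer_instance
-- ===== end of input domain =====

-- Port A keeps the single-pass adjacent-difference gap detector; B extracts maximal runs by the
-- arithmetic invariant frm_lst[i]-i (outer run-to-run loop, inner run scan): alternative decomposition, same cost.


-- ===== PORT A =====
def pvStepA (frm : List Int) (st : Int × List (List Int)) (i : Int) : Int × List (List Int) :=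
  if PySem.List.pyGetD frm (i + 1) 0 - PySem.List.pyGetD frm i 0 ≠ 1 then
    (i + 1, st.2 ++ [[st.1, i + 1]])
  else st

def get_frm_gap (frm_lst : List Int) : List (List Int) :=
  let st := (PySem.List.pyRange 0 ((frm_lst.length : Int) - 1) 1).foldl (pvStepA frm_lst) (0, [])
  st.2 ++ [[st.1, (frm_lst.length : Int)]]

-- ===== PORT B =====
-- inner while: extend the run while frm_lst[end] - end equals the run-start key
def pvRunEnd (frm : List Int) (n key e : Int) : Int :=
  if h : e < n ∧ PySem.List.pyGetD frm e 0 - e = key then pvRunEnd frm n key (e + 1) else e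
termination_by (n - e).toNat
decreasing_by omega

-- needed by pvSegs's termination: the inner scan never moves backwards
theorem pvRunEnd_ge (frm : List Int) (n key e : Int) : e ≤ pvRunEnd frm n key e := by
  rw [pvRunEnd]
  split
  next h => have := pvRunEnd_ge frm n key (e + 1); omega
  next => omega
termination_by (n - e).toNat
decreasing_by omega

-- outer while: emit one run, jump to its end
def pvSegs (frm : List Int) (n start : Int) : List (List Int) :=
  if h : start < n then
    [start, pvRunEnd frm n (PySem.List.pyGetD frm start 0 - start) (start + 1)]
      :: pvSegs frm n (pvRunEnd frm n (PySem.List.pyGetD frm start 0 - start) (start + 1))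
  else []
termination_by (n - start).toNat
decreasing_by
  have := pvRunEnd_ge frm n (PySem.List.pyGetD frm start 0 - start) (start + 1)
  omega

def get_frm_gap_alt (frm_lst : List Int) : List (List Int) :=
  if pvSegs frm_lst (frm_lst.length : Int) 0 = [] then [[0, 0]]
  else pvSegs frm_lst (frm_lst.length : Int) 0

-- ===== PRECONDITION & SPEC =====
def Spec_get_frm_gap (frm_lst : List Int) (out : List (List Int)) : Prop := out = get_frm_gap_alt frm_lst
instance (frm_lst : List Int) (out : List (List Int)) : Decidable (Spec_get_frm_gap frm_lst out) := by unfold Spec_get_frm_gap; infer_instance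

-- ===== CLAIM (what is proved, stated in full; the proofs are below) =====
def Claim_equal_get_frm_gap : Prop := ∀ (frm_lst : List Int), Dom_get_frm_gap frm_lst → Spec_get_frm_gap frm_lst (get_frm_gap frm_lst)

-- ===== LEMMAS AND PROOFS =====

/-- Pair consecutive elements of a list. -/
def zp : List Int → List (List Int)
  | a :: b :: l => [a, b] :: zp (b :: l)
  | _ => []

/-- A's gap test on the left index. -/
def pA (frm : List Int) (i : Int) : Bool :=
  decide (PySem.List.pyGetD frm (i + 1) 0 - PySem.List.pyGetD frm i 0 ≠ 1)

/-- The same gap test on the right index (the boundary position itself). -/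
def gB (frm : List Int) (i : Int) : Bool :=
  decide (PySem.List.pyGetD frm i 0 - PySem.List.pyGetD frm (i - 1) 0 ≠ 1)

def cuts (frm : List Int) (is_ : List Int) : List Int :=
  (is_.filter (pA frm)).map (· + 1)

theorem foldl_stepA (frm : List Int) (is_ : List Int) : ∀ (init : Int) (acc : List (List Int)),
    is_.foldl (pvStepA frm) (init, acc) =
      ((cuts frm is_).getLastD init, acc ++ zp (init :: cuts frm is_)) := by
  induction is_ with
  | nil => intro init acc; simp [cuts, zp]
  | cons i is_ ih =>
    intro init acc
    simp only [List.foldl_cons]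
    by_cases h : PySem.List.pyGetD frm (i + 1) 0 - PySem.List.pyGetD frm i 0 ≠ 1
    · have hc : cuts frm (i :: is_) = (i + 1) :: cuts frm is_ := by
        simp [cuts, pA, h]
      rw [show pvStepA frm (init, acc) i = (i + 1, acc ++ [[init, i + 1]]) by
        simp [pvStepA, h]]
      rw [ih (i + 1) (acc ++ [[init, i + 1]]), hc, List.getLastD_cons]
      simp [zp]
    · have hc : cuts frm (i :: is_) = cuts frm is_ := by
        simp [cuts, pA, h]
      rw [show pvStepA frm (init, acc) i = (init, acc) by simp [pvStepA, h]]
      rw [ih init acc, hc]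

theorem zp_append_last (l : List Int) : ∀ (a x : Int),
    zp (a :: (l ++ [x])) = zp (a :: l) ++ [[l.getLastD a, x]] := by
  induction l with
  | nil => intro a x; simp [zp]
  | cons b l ih =>
    intro a x
    simp only [List.cons_append, zp, List.getLastD_cons]
    rw [ih b x]

theorem pyRange_one_shift (n : Int) :
    PySem.List.pyRange 1 n 1 = (PySem.List.pyRange 0 (n - 1) 1).map (· + 1) := by
  rw [PySem.List.pyRange_one, PySem.List.pyRange_one]
  simp only [List.map_map, sub_zero]
  apply List.map_congr_left
  intro k _
  simp [Function.comp]
  omega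

theorem cuts_eq_filterB (frm : List Int) (n : Int) :
    (PySem.List.pyRange 1 n 1).filter (gB frm) = cuts frm (PySem.List.pyRange 0 (n - 1) 1) := by
  rw [pyRange_one_shift, List.filter_map]
  unfold cuts
  congr 1
  apply List.filter_congr
  intro i _
  simp [pA, gB, Function.comp]

/-- A computes the consecutive pairs of (0 :: gap positions ++ [n]). -/
theorem A_eq_zp (frm : List Int) :
    get_frm_gap frm =
      zp (0 :: ((PySem.List.pyRange 1 (frm.length : Int) 1).filter (gB frm) ++ [(frm.length : Int)])) := by
  unfold get_frm_gap
  rw [foldl_stepA, ← cuts_eq_filterB frm (frm.length : Int), zp_append_last]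
  rfl

/-- Full spec of the inner scan: run invariant, stop reason, upper bound. -/
theorem pvRunEnd_spec (frm : List Int) (n key e : Int) :
    (∀ i : Int, e ≤ i → i < pvRunEnd frm n key e → PySem.List.pyGetD frm i 0 - i = key) ∧
    (pvRunEnd frm n key e < n → PySem.List.pyGetD frm (pvRunEnd frm n key e) 0 - pvRunEnd frm n key e ≠ key) ∧
    (e ≤ n → pvRunEnd frm n key e ≤ n) := by
  rw [pvRunEnd]
  split
  next h =>
    have ih := pvRunEnd_spec frm n key (e + 1)
    refine ⟨?_, ih.2.1, fun _ => ih.2.2 (by omega)⟩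
    intro i h1 h2
    rcases eq_or_lt_of_le h1 with rfl | h1'
    · exact h.2
    · exact ih.1 i (by omega) h2
  next h =>
    refine ⟨fun i h1 h2 => absurd h1 (by omega), ?_, fun h' => h'⟩
    intro hlt hkey
    exact h ⟨hlt, hkey⟩
termination_by (n - e).toNat
decreasing_by omega

theorem filter_skip (frm : List Int) (a b c : Int) (hab : a ≤ b) (hbc : b ≤ c)
    (hf : ∀ i : Int, a ≤ i → i < b → gB frm i = false) :
    (PySem.List.pyRange a c 1).filter (gB frm) = (PySem.List.pyRange b c 1).filter (gB frm) := by
  rw [PySem.List.pyRange_one_append a b c hab hbc, List.filter_append]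
  have : (PySem.List.pyRange a b 1).filter (gB frm) = [] := by
    rw [List.filter_eq_nil_iff]
    intro i hi
    have := PySem.List.mem_pyRange_one.mp hi
    simp [hf i this.1 this.2]
  rw [this, List.nil_append]

/-- B's run extraction produces the consecutive pairs of (s :: gap positions after s ++ [n]):
    fuel-indexed strong induction on the remaining length n - s. -/
theorem segs_zp_aux (frm : List Int) (n : Int) : ∀ (k : Nat) (s : Int), (n - s).toNat ≤ k → 0 ≤ s → s < n →
    pvSegs frm n s = zp (s :: ((PySem.List.pyRange (s + 1) n 1).filter (gB frm) ++ [n])) := by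
  intro k
  induction k with
  | zero => intro s hk h0 h1; omega
  | succ k ihk =>
  intro s hk h0 h1
  have ih : ∀ e : Int, s < e → 0 ≤ e → e < n →
      pvSegs frm n e = zp (e :: ((PySem.List.pyRange (e + 1) n 1).filter (gB frm) ++ [n])) := by
    intro e hse h0e h1e
    exact ihk e (by omega) h0e h1e
  rw [pvSegs, dif_pos h1]
  have hspec := pvRunEnd_spec frm n (PySem.List.pyGetD frm s 0 - s) (s + 1)
  obtain ⟨e, he⟩ : ∃ x, x = pvRunEnd frm n (PySem.List.pyGetD frm s 0 - s) (s + 1) := ⟨_, rfl⟩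
  rw [← he] at hspec ⊢
  have hge : s + 1 ≤ e := he ▸ pvRunEnd_ge frm n _ (s + 1)
  have hle : e ≤ n := hspec.2.2 (by omega)
  -- key is constant on [s, e)
  have hrun : ∀ i : Int, s ≤ i → i < e →
      PySem.List.pyGetD frm i 0 - i = PySem.List.pyGetD frm s 0 - s := by
    intro i hi1 hi2
    rcases eq_or_lt_of_le hi1 with rfl | hi'
    · rfl
    · exact hspec.1 i (by omega) hi2
  -- hence no gap at every boundary in (s, e)
  have hnogap : ∀ i : Int, s + 1 ≤ i → i < e → gB frm i = false := by
    intro i hi1 hi2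
    have k1 := hrun i (by omega) hi2
    have k2 := hrun (i - 1) (by omega) (by omega)
    simp only [gB, decide_eq_false_iff_not, not_not]
    omega
  rw [filter_skip frm (s + 1) e n hge hle hnogap]
  by_cases hen : e = n
  · subst hen
    rw [PySem.List.pyRange_one_eq_nil (le_refl e), List.filter_nil, List.nil_append]
    rw [pvSegs, dif_neg (lt_irrefl e)]
    simp [zp]
  · have hlt : e < n := lt_of_le_of_ne hle hen
    -- there is a gap at e
    have hgap : gB frm e = true := by
      have k1 := hspec.2.1 hlt
      have k2 := hrun (e - 1) (by omega) (by omega)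
      simp only [gB, decide_eq_true_eq]
      omega
    rw [PySem.List.pyRange_one_cons hlt, List.filter_cons, hgap]
    rw [ih e (by omega) (by omega) hlt]
    simp [zp]

theorem segs_zp (frm : List Int) (n s : Int) (h0 : 0 ≤ s) (h1 : s < n) :
    pvSegs frm n s = zp (s :: ((PySem.List.pyRange (s + 1) n 1).filter (gB frm) ++ [n])) :=
  segs_zp_aux frm n (n - s).toNat s le_rfl h0 h1

theorem zp_two_ne_nil (a : Int) (l : List Int) (x : Int) : zp (a :: (l ++ [x])) ≠ [] := by
  cases l with
  | nil => simp [zp]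
  | cons b l => simp [zp]

-- ===== VERDICT (by name: the statement is the Claim_ definition above) =====
theorem get_frm_gap_spec : Claim_equal_get_frm_gap := by
  intro frm _
  unfold Spec_get_frm_gap
  rw [A_eq_zp]
  unfold get_frm_gap_alt
  cases frm with
  | nil =>
    have h : pvSegs ([] : List Int) ((([] : List Int).length : Int)) 0 = [] := by
      rw [pvSegs]
      norm_num
    rw [h, if_pos rfl]
    simp [zp, PySem.List.pyRange_one_eq_nil]
  | cons a l =>
    have hn : (0 : Int) < ((a :: l).length : Int) := by
      simp
    rw [segs_zp (a :: l) ((a :: l).length : Int) 0 (le_refl 0) hn]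
    rw [if_neg (zp_two_ne_nil 0 _ _)]
    norm_num
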